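-- pv_equiv track=rewrite | github.com/Jaminggu/algo-programmers | 프로그래머스/2/42587. 프로세스/프로세스.py | solution
-- ===== SOURCE A (Python) =====
-- from collections import deque
--
-- def solution(priorities, location):
--     answer = 0
--     priorities = deque(priorities)
--     index = deque(range(len(priorities)))
--
--     while priorities:
--         maxP = max(priorities)
--
--         if priorities[0] == maxP:
--             priorities.popleft()
--             answer += 1
--             if index.popleft() == location:
--                 break
--         else:
--             priorities.append(priorities.popleft())
--             index.append(index.popleft())
--
--     return answer
-- ===== SOURCE B (Python) =====
-- from collections import deque
--
-- def solution(priorities, location):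
--     # Presort priorities descending: the job executed k-th always has priority
--     # targets[k], so the O(n) max() scan of every queue step disappears.
--     targets = sorted(priorities, reverse=True)
--     q = deque(enumerate(priorities))
--     answer = 0
--     while q:
--         i, p = q.popleft()
--         if p == targets[answer]:
--             answer += 1
--             if i == location:
--                 break
--         else:
--             q.append((i, p))
--     return answer
-- ===== Notes on version B (the rewrite author's own statement) =====
-- stated objective: faster
-- what changed: B presorts the priorities descending once, so the k-th executed job must have priority targets[k]: the inner max() scan of every queue iteration disappears and one queue of (index,priority) pairs replaces A's two parallel deques.
import Mathlib
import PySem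

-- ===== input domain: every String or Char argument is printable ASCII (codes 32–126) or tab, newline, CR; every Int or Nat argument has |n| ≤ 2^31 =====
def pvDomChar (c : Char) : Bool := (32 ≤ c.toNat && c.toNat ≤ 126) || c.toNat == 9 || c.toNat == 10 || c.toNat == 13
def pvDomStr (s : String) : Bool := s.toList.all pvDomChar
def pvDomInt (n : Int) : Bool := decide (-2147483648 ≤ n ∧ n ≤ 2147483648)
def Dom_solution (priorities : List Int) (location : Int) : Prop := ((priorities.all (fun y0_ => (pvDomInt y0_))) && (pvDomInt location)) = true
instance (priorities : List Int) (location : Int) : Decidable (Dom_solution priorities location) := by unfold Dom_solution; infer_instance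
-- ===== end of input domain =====

-- B presorts the priorities descending once (the k-th executed job has priority targets[k]),
-- removing A's per-iteration max() scan; objective: faster (asymptotic).


-- ===== PORT A =====
-- A's while loop over the two parallel deques; fuel is only a totality guard
-- ((n+1)^2 bounds the iterations: at most n rotations between consecutive pops).
def solutionLoopA (location : Int) : Nat → List Int → List Int → Int → Int
  | 0, _, _, answer => answer
  | fuel + 1, prios, idx, answer =>
    match prios with
    | [] => answer
    | p :: rest =>
      match PySem.List.max? (p :: rest) (fun y => y) with
      | none => answer  -- unreachable: max? of a nonempty list is some
      | some maxP =>
        if p = maxP then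
          match idx with
          | [] => answer + 1  -- unreachable: idx always has the same length as prios
          | ix :: irest =>
            if ix = location then answer + 1
            else solutionLoopA location fuel rest irest (answer + 1)
        else
          match idx with
          | [] => answer  -- unreachable: idx always has the same length as prios
          | ix :: irest => solutionLoopA location fuel (rest ++ [p]) (irest ++ [ix]) answer

def solution (priorities : List Int) (location : Int) : Int :=
  solutionLoopA location ((priorities.length + 1) * (priorities.length + 1))
    priorities (PySem.List.pyRange 0 priorities.length 1) 0

-- ===== PORT B =====
-- B's while loop over one deque of (index, priority) pairs, comparing against the
-- presorted descending targets; fuel is the same totality guard.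
def solutionLoopB (location : Int) (targets : List Int) : Nat → List (Int × Int) → Int → Int
  | 0, _, answer => answer
  | fuel + 1, q, answer =>
    match q with
    | [] => answer
    | (i, p) :: qrest =>
      match PySem.List.pyGet? targets answer with
      | none => answer  -- unreachable: answer < len(targets) while the queue is nonempty
      | some t =>
        if p = t then
          if i = location then answer + 1
          else solutionLoopB location targets fuel qrest (answer + 1)
        else solutionLoopB location targets fuel (qrest ++ [(i, p)]) answer

def solution_alt (priorities : List Int) (location : Int) : Int :=
  let targets := PySem.List.sorted priorities (fun y => y) true
  solutionLoopB location targets ((priorities.length + 1) * (priorities.length + 1))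
    (PySem.List.enumerate priorities 0) 0

-- ===== PRECONDITION & SPEC =====
def Spec_solution (priorities : List Int) (location : Int) (out : Int) : Prop := out = solution_alt priorities location
instance (priorities : List Int) (location : Int) (out : Int) : Decidable (Spec_solution priorities location out) := by unfold Spec_solution; infer_instance

-- ===== CLAIM (what is proved, stated in full; the proofs are below) =====
def Claim_equal_solution : Prop := ∀ (priorities : List Int) (location : Int), Dom_solution priorities location → Spec_solution priorities location (solution priorities location)

-- ===== LEMMAS AND PROOFS =====

-- A descending-sorted nonempty list's head is the max of any permutation of it.
theorem max_of_perm_desc (t : Int) (ts l : List Int)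
    (hpw : (t :: ts).Pairwise (fun a b => b ≤ a)) (hperm : (t :: ts).Perm l)
    (p : Int) (rest : List Int) (hl : l = p :: rest) :
    PySem.List.max? l (fun y => y) = some t := by
  subst hl
  rw [PySem.List.max?_id_cons]
  have hM := PySem.List.le_foldl_max rest p
  have hmem := PySem.List.foldl_max_mem rest p
  have htl : t ∈ p :: rest := hperm.mem_iff.mp (List.mem_cons_self)
  have hle : ∀ x ∈ p :: rest, x ≤ t := by
    intro x hx
    have : x ∈ t :: ts := hperm.symm.mem_iff.mp hx
    rcases List.mem_cons.mp this with h | h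
    · exact le_of_eq h
    · exact (List.pairwise_cons.mp hpw).1 x h
  have h1 : rest.foldl max p ≤ t := by
    rcases hmem with h | h
    · rw [h]; exact hle p List.mem_cons_self
    · exact hle _ (List.mem_cons_of_mem _ h)
  have h2 : t ≤ rest.foldl max p := by
    rcases List.mem_cons.mp htl with h | h
    · rw [h]; exact hM.1
    · exact hM.2 t h
  exact congrArg some (le_antisymm h1 h2)

theorem loop_eq (location : Int) (targets : List Int)
    (hpw : targets.Pairwise (fun a b => b ≤ a)) :
    ∀ (fuel : Nat) (q : List (Int × Int)) (answer : Int),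
      0 ≤ answer →
      (targets.drop answer.toNat).Perm (q.map Prod.snd) →
      solutionLoopA location fuel (q.map Prod.snd) (q.map Prod.fst) answer
        = solutionLoopB location targets fuel q answer := by
  intro fuel
  induction fuel with
  | zero => intro q answer _ _; simp [solutionLoopA, solutionLoopB]
  | succ fuel ih =>
    intro q answer hans hperm
    match q with
    | [] => simp [solutionLoopA, solutionLoopB]
    | (i, p) :: qrest =>
      simp only [List.map_cons] at *
      -- the drop is nonempty
      obtain ⟨t, ts, hdrop⟩ : ∃ t ts, targets.drop answer.toNat = t :: ts := by
        cases h : targets.drop answer.toNat with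
        | nil => rw [h] at hperm; exact absurd hperm.symm (by simp)
        | cons a b => exact ⟨a, b, rfl⟩
      rw [hdrop] at hperm
      have hpwd : (t :: ts).Pairwise (fun a b => b ≤ a) := by
        rw [← hdrop]; exact hpw.sublist (List.drop_sublist _ _)
      have hmax := max_of_perm_desc t ts _ hpwd hperm p (qrest.map Prod.snd) rfl
      have hget : PySem.List.pyGet? targets answer = some t := by
        rw [PySem.List.pyGet?_of_nonneg targets hans]
        have hlt : answer.toNat < targets.length := by
          by_contra h
          have : targets.drop answer.toNat = [] := List.drop_eq_nil_of_le (by omega)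
          rw [this] at hdrop; exact absurd hdrop (by simp)
        have h0 : (List.drop answer.toNat targets)[0]? = targets[answer.toNat + 0]? :=
          List.getElem?_drop
        rw [hdrop] at h0
        simpa using h0.symm
      have hdrop1 : targets.drop (answer.toNat + 1) = ts := by
        have h1 : List.drop 1 (List.drop answer.toNat targets) = List.drop (answer.toNat + 1) targets :=
          List.drop_drop
        rw [← h1, hdrop]; rfl
      simp only [solutionLoopA, solutionLoopB, hmax, hget]
      by_cases hpt : p = t
      · simp only [if_pos hpt]
        by_cases hil : i = location
        · simp [hil]
        · simp only [if_neg hil]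
          have := ih qrest (answer + 1) (by omega) (by
            have : (answer + 1).toNat = answer.toNat + 1 := by omega
            rw [this, hdrop1]
            exact (hpt ▸ hperm).cons_inv)
          exact this
      · simp only [if_neg hpt]
        have := ih (qrest ++ [(i, p)]) answer hans (by
          rw [hdrop]
          simp only [List.map_append, List.map_cons, List.map_nil]
          exact hperm.trans (List.perm_append_singleton p _).symm)
        simpa using this

-- ===== VERDICT (by name: the statement is the Claim_ definition above) =====
theorem solution_spec : Claim_equal_solution := by
  intro priorities location _
  unfold Spec_solution solution solution_alt
  have hpw : (PySem.List.sorted priorities (fun y => y) true).Pairwise (fun a b => b ≤ a) :=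
    PySem.List.sorted_pairwise_rev priorities (fun y => y)
  have hsnd : (PySem.List.enumerate priorities 0).map Prod.snd = priorities :=
    PySem.List.map_snd_enumerate priorities 0
  have hfst : (PySem.List.enumerate priorities 0).map Prod.fst
      = PySem.List.pyRange 0 priorities.length 1 := by
    have := PySem.List.map_fst_enumerate priorities 0
    simpa using this
  have := loop_eq location (PySem.List.sorted priorities (fun y => y) true) hpw
    ((priorities.length + 1) * (priorities.length + 1))
    (PySem.List.enumerate priorities 0) 0 (by omega)
    (by simpa [hsnd] using (PySem.List.sorted_perm priorities (fun y => y) true))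
  rw [hsnd, hfst] at this
  exact this
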